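-- pv_equiv track=rewrite | github.com/ABelliqueux/t4b-tools | img2t4b.py | reduce_color
-- ===== SOURCE A (Python) =====
-- REDUCE_MARKS = [16, 32, 48, 64, 80, 96, 112, 128, 144, 160, 176, 192, 208, 224, 240]
--
-- def reduce_color(c):
--     val = 0
--     for mark in REDUCE_MARKS:
--         if c > mark:
--             val += 1
--         else:
--             break
--     return val
-- ===== SOURCE B (Python) =====
-- import bisect
--
-- REDUCE_MARKS = [16, 32, 48, 64, 80, 96, 112, 128, 144, 160, 176, 192, 208, 224, 240]
--
-- def reduce_color(c):
--     # number of marks strictly less than c = insertion index via binary search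
--     return bisect.bisect_left(REDUCE_MARKS, c)
-- ===== Notes on version B (the rewrite author's own statement) =====
-- stated objective: idiomatic
-- what changed: Replaced the linear scan-with-break counting loop by a bisect.bisect_left binary search over the sorted constant mark list, returning the insertion index directly.
import Mathlib
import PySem

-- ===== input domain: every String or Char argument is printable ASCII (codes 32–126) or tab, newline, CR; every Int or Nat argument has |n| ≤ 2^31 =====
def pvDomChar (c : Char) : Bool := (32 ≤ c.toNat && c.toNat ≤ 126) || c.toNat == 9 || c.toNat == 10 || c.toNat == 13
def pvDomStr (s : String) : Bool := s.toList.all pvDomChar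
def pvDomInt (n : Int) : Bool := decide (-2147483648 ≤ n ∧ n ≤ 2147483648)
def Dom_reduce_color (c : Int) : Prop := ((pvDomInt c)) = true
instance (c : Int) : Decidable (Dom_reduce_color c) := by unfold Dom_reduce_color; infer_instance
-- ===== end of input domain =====

-- B replaces A's linear scan-with-break by a bisect_left binary search over the sorted mark list (idiomatic).

-- ===== PORT A =====
def REDUCE_MARKS : List Int := [16, 32, 48, 64, 80, 96, 112, 128, 144, 160, 176, 192, 208, 224, 240]

-- the for-loop with break: count while c > mark, stop at the first failure
def reduceLoop (c : Int) : List Int → Int → Int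
  | [], val => val
  | mark :: ms, val => if c > mark then reduceLoop c ms (val + 1) else val

def reduce_color (c : Int) : Int := reduceLoop c REDUCE_MARKS 0

-- ===== PORT B =====
-- bisect.bisect_left: binary search for the insertion index (fuel bounds the halving)
def bisectLeftAux (marks : List Int) (c : Int) : Nat → Nat → Nat → Nat
  | 0, lo, _ => lo
  | fuel + 1, lo, hi =>
    if lo < hi then
      let mid := (lo + hi) / 2
      if marks.getD mid 0 < c then bisectLeftAux marks c fuel (mid + 1) hi
      else bisectLeftAux marks c fuel lo mid
    else lo

def reduce_color_alt (c : Int) : Int :=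
  (bisectLeftAux REDUCE_MARKS c REDUCE_MARKS.length 0 REDUCE_MARKS.length : Int)

-- ===== PRECONDITION & SPEC =====
def Spec_reduce_color (c : Int) (out : Int) : Prop := out = reduce_color_alt c
instance (c : Int) (out : Int) : Decidable (Spec_reduce_color c out) := by unfold Spec_reduce_color; infer_instance

-- ===== CLAIM (what is proved, stated in full; the proofs are below) =====
def Claim_equal_reduce_color : Prop := ∀ (c : Int), Dom_reduce_color c → Spec_reduce_color c (reduce_color c)

-- ===== LEMMAS AND PROOFS =====

-- ===== VERDICT (by name: the statement is the Claim_ definition above) =====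
set_option maxHeartbeats 1000000 in
theorem reduce_color_spec : Claim_equal_reduce_color := by
  intro c _
  unfold Spec_reduce_color reduce_color reduce_color_alt
  conv_lhs => simp [REDUCE_MARKS, reduceLoop]
  conv_rhs => simp [REDUCE_MARKS, bisectLeftAux, List.getD]
  omega
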